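-- pv_equiv track=rewrite | github.com/brendolyn/Finding-Hidden-Messages-in-DNA-Bioinformatics-I--and-Genomic-Data-Science-and-Clustering-V- | skew.py | maximumSkew
-- ===== SOURCE A (Python) =====
-- def skew(sequence):
--     count=0
--     skew=[]
--     skew.append(count)
--     for i in range(len(sequence)):
--         if(sequence[i]=='G'):
--             count=count+1
--         elif(sequence[i]=='C'):
--             count=count-1
--         skew.append(count)
--     return(skew)
--
-- def maximumSkew(sequence):
--     sk=skew(sequence)
--     mins=[]
--     msk=max(sk)
--     for i in range(len(sk)):
--         if(sk[i]==msk):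
--             mins.append(i)
--     return(mins)
-- ===== SOURCE B (Python) =====
-- def maximumSkew(sequence):
--     # one fused pass: running skew count, running best, running argmax positions
--     count = 0
--     best = 0
--     positions = [0]
--     i = 1
--     for ch in sequence:
--         if ch == 'G':
--             count += 1
--         elif ch == 'C':
--             count -= 1
--         if count > best:
--             best = count
--             positions = [i]
--         elif count == best:
--             positions.append(i)
--         i += 1
--     return positions
-- ===== Notes on version B (the rewrite author's own statement) =====
-- stated objective: simpler
-- what changed: Fuses A's three passes (materialize the whole skew list, take its max, then scan it again for argmax indices) into one streaming loop that keeps only the running count, the best value and the argmax positions, never building the skew list.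
import Mathlib
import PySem

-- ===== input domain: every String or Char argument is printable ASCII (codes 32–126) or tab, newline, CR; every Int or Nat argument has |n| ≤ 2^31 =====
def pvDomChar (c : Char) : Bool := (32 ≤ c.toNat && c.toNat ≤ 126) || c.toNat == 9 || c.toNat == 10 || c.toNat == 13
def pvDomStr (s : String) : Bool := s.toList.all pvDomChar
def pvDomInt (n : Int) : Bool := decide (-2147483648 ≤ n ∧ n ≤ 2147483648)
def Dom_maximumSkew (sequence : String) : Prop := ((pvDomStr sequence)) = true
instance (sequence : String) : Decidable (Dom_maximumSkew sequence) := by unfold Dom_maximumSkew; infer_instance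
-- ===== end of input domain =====

-- B fuses A's three passes (build skew list, max, argmax scan) into one streaming loop; objective: simpler.

-- ===== PORT A =====
-- the shared per-character update: +1 for 'G', -1 for 'C' (identical lines in Source A and Source B)
def updSkew (count : Int) (c : Char) : Int :=
  if c = 'G' then count + 1 else if c = 'C' then count - 1 else count

-- Python's skew(): loop appending the running count to the list (initialised to [0])
def skewLoopA (count : Int) (sk : List Int) : List Char → Int × List Int
  | [] => (count, sk)
  | c :: cs =>
    let count' := updSkew count c
    skewLoopA count' (sk ++ [count']) cs

def skewA (sequence : String) : List Int :=
  (skewLoopA 0 [0] sequence.toList).2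

-- the mins-collecting loop of maximumSkew: for i in range(len(sk)): if sk[i]==msk: mins.append(i)
def collectA (msk : Int) (i : Int) : List Int → List Int
  | [] => []
  | x :: xs => if x = msk then i :: collectA msk (i + 1) xs else collectA msk (i + 1) xs

def maximumSkew (sequence : String) : List Int :=
  let sk := skewA sequence
  -- sk always starts with 0, so Python's max(sk) never raises; getD 0 is unreachable
  let msk := (PySem.List.max? sk (fun x => x)).getD 0
  collectA msk 0 sk

-- ===== PORT B =====
def loopB (count best : Int) (positions : List Int) (i : Int) : List Char → List Int
  | [] => positions
  | c :: cs =>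
    let count' := updSkew count c
    if count' > best then loopB count' count' [i] (i + 1) cs
    else if count' = best then loopB count' best (positions ++ [i]) (i + 1) cs
    else loopB count' best positions (i + 1) cs

def maximumSkew_alt (sequence : String) : List Int :=
  loopB 0 0 [0] 1 sequence.toList

-- ===== PRECONDITION & SPEC =====
def Spec_maximumSkew (sequence : String) (out : List Int) : Prop := out = maximumSkew_alt sequence
instance (sequence : String) (out : List Int) : Decidable (Spec_maximumSkew sequence out) := by unfold Spec_maximumSkew; infer_instance

-- ===== CLAIM (what is proved, stated in full; the proofs are below) =====
def Claim_equal_maximumSkew : Prop := ∀ (sequence : String), Dom_maximumSkew sequence → Spec_maximumSkew sequence (maximumSkew sequence)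

-- ===== LEMMAS AND PROOFS =====

-- the tail of skew values produced after the initial 0
def scanSk (count : Int) : List Char → List Int
  | [] => []
  | c :: cs =>
    let count' := updSkew count c
    count' :: scanSk count' cs

theorem skewLoopA_eq (cs : List Char) : ∀ (count : Int) (sk : List Int),
    (skewLoopA count sk cs).2 = sk ++ scanSk count cs := by
  induction cs with
  | nil => intro count sk; simp [skewLoopA, scanSk]
  | cons c cs ih => intro count sk; simp [skewLoopA, scanSk, ih]

theorem skewA_eq (s : String) : skewA s = 0 :: scanSk 0 s.toList := by
  simp [skewA, skewLoopA_eq]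

theorem le_foldl_max' (l : List Int) : ∀ a : Int, a ≤ l.foldl max a := by
  intro a; exact (PySem.List.le_foldl_max l a).1

-- main invariant: B's fused loop equals "keep pos iff best is still the overall max, then collect"
theorem loopB_eq (cs : List Char) : ∀ (count best : Int) (pos : List Int) (i : Int),
    loopB count best pos i cs =
      (if best = (scanSk count cs).foldl max best then pos else []) ++
        collectA ((scanSk count cs).foldl max best) i (scanSk count cs) := by
  induction cs with
  | nil => intro count best pos i; simp [loopB, scanSk, collectA]
  | cons c cs ih =>
    intro count best pos i
    simp only [loopB, scanSk, List.foldl_cons, collectA]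
    obtain ⟨n, hn⟩ : ∃ n, updSkew count c = n := ⟨_, rfl⟩
    simp only [hn]
    by_cases h1 : n > best
    · have hmax : max best n = n := max_eq_right (le_of_lt h1)
      have hge : n ≤ (scanSk n cs).foldl max n := le_foldl_max' _ _
      have hne : ¬ best = (scanSk n cs).foldl max n := by omega
      simp only [if_pos h1, ih, hmax, if_neg hne, List.nil_append]
      by_cases h2 : n = (scanSk n cs).foldl max n
      · simp only [if_pos h2]; simp
      · simp only [if_neg h2]; simp
    · have hmax : max best n = best := max_eq_left (by omega)
      have hge : best ≤ (scanSk n cs).foldl max best := le_foldl_max' _ _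
      simp only [if_neg h1, hmax]
      by_cases h2 : n = best
      · simp only [ih, h2]
        split_ifs with h3 <;> simp
      · have hne : ¬ n = (scanSk n cs).foldl max best := by omega
        simp only [if_neg h2, ih, if_neg hne]

theorem maximumSkew_eq_general (s : String) :
    maximumSkew s =
      (if (0:Int) = (scanSk 0 s.toList).foldl max 0 then [(0:Int)] else []) ++
        collectA ((scanSk 0 s.toList).foldl max 0) 1 (scanSk 0 s.toList) := by
  simp only [maximumSkew, skewA_eq]
  rw [PySem.List.max?_id_cons]
  simp only [Option.getD_some, collectA]
  norm_num
  split_ifs with h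
  · simp
  · simp

-- ===== VERDICT (by name: the statement is the Claim_ definition above) =====
theorem maximumSkew_spec : Claim_equal_maximumSkew := by
  intro s _
  unfold Spec_maximumSkew maximumSkew_alt
  rw [maximumSkew_eq_general, loopB_eq]
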